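-- pv_equiv track=rewrite | github.com/jjm6604/problem | 프로그래머스/2/169199. 리코쳇 로봇/리코쳇 로봇.py | solution
-- ===== SOURCE A (Python) =====
-- from collections import deque
--
-- direct = [(1, 0), (-1, 0), (0, 1), (0, -1)]
--
-- def solution(board):
--     answer = -1
--     N, M = len(board), len(board[0])
--     for i in range(N):
--         for j in range(M):
--             if board[i][j] == 'R':
--                 start = [i, j]
--             if board[i][j] == 'G':
--                 goal = [i, j]
--
--     q = deque()
--     q.append(start)
--     v = [[-1] * M for _ in range(N)]
--     v[start[0]][start[1]] = 0
--     while q: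
--         x, y = q.popleft()
--         if x == goal[0] and y == goal[1]:
--             answer = v[x][y]
--             break
--         for d in direct:
--             dx, dy = x, y
--             while True:
--                 nx = dx + d[0]
--                 ny = dy + d[1]
--                 if 0 <= nx < N and 0 <= ny < M and board[nx][ny] != 'D':
--                     dx, dy = nx, ny
--                 else:
--                     break
--             if v[dx][dy] == -1:
--                 v[dx][dy] = v[x][y] + 1
--                 q.append([dx, dy])
--
--     return answer
-- ===== SOURCE B (Python) =====
-- def solution(board):
--     N, M = len(board), len(board[0])
--     for i in range(N):
--         for j in range(M):
--             if board[i][j] == 'R':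
--                 start = (i, j)
--             if board[i][j] == 'G':
--                 goal = (i, j)
--     reach = {start}
--     step = 0
--     while True:
--         if goal in reach:
--             return step
--         grown = set(reach)
--         for (x, y) in reach:
--             for (ddx, ddy) in ((1, 0), (-1, 0), (0, 1), (0, -1)):
--                 dx, dy = x, y
--                 while True:
--                     nx = dx + ddx
--                     ny = dy + ddy
--                     if 0 <= nx < N and 0 <= ny < M and board[nx][ny] != 'D':
--                         dx, dy = nx, ny
--                     else:
--                         break
--                 grown.add((dx, dy))
--         if len(grown) == len(reach):
--             return -1
--         reach = grown
--         step += 1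
-- ===== Notes on version B (the rewrite author's own statement) =====
-- stated objective: alternative
-- what changed: Replaces the deque-plus-distance-matrix BFS by fixpoint iteration of the one-step slide-reachability operator: the whole reachable set is re-expanded each round and a round counter is returned when the goal enters the set, or -1 when the set stops growing; no queue and no distance array exist.
import Mathlib
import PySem

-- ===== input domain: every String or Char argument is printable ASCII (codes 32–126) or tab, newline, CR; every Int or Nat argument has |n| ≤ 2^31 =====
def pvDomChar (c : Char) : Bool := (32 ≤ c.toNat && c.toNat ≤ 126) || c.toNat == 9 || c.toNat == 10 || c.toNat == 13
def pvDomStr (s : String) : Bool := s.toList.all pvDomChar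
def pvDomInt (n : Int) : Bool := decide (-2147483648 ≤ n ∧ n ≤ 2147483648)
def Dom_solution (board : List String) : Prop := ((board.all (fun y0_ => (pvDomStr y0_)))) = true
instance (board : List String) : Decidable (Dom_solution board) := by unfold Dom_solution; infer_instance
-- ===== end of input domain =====

-- B replaces A's deque-plus-distance-matrix BFS by fixpoint iteration of the one-step
-- slide-reachability operator (the whole reachable set is re-expanded each round, with a
-- round counter); the R/G scan and the inner slide loop are the same code in both Pythons,
-- so the ports share the helpers `scanRG` and `slide`.

-- board[i][j] for indices that the calling code has already guarded to satisfy
-- 0 ≤ i < len(board), 0 ≤ j ≤ len(board[i]) (scan and slide only read guarded cells),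
-- where plain non-negative indexing is exact.
def bget (board : List String) (i j : Int) : Char :=
  ((board.getD i.toNat "").toList).getD j.toNat ' '

-- the two identical scan loops: for i in range(N): for j in range(M): remember last 'R'/'G'
def scanRG (board : List String) (N M : Int) :
    Option (Int × Int) × Option (Int × Int) :=
  (PySem.List.pyRange 0 N 1).foldl (fun st i =>
    (PySem.List.pyRange 0 M 1).foldl (fun st2 j =>
      let st3 := if bget board i j = 'R' then ((some (i, j) : Option (Int × Int)), st2.2) else st2
      if bget board i j = 'G' then (st3.1, some (i, j)) else st3) st) (none, none)

-- fuel for the inner `while True` slide: each step moves one cell further inside the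
-- N×M rectangle, so (N+M)+1 steps never run out on the guarded in-range starts.
def slideFuel (N M : Int) : Nat := (N + M).toNat + 1

def slide (board : List String) (N M : Int) (d : Int × Int) :
    Nat → Int × Int → Int × Int
  | 0, p => p
  | fuel + 1, p =>
      let nx := p.1 + d.1
      let ny := p.2 + d.2
      if 0 ≤ nx ∧ nx < N ∧ 0 ≤ ny ∧ ny < M ∧ bget board nx ny ≠ 'D'
      then slide board N M d fuel (nx, ny)
      else p

def dirs : List (Int × Int) := [(1, 0), (-1, 0), (0, 1), (0, -1)]

-- ===== PORT A =====

-- v[x][y] / v[dx][dy] — all reads and writes are at guarded in-range non-negative indices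
def mget (v : List (List Int)) (i j : Int) : Int :=
  (v.getD i.toNat []).getD j.toNat (-2)

def mset (v : List (List Int)) (i j : Int) (x : Int) : List (List Int) :=
  v.set i.toNat ((v.getD i.toNat []).set j.toNat x)

-- body of `for d in direct:` — slide, then conditionally mark and append
def aStep (board : List String) (N M : Int) (c : Int × Int)
    (st : List (Int × Int) × List (List Int)) (d : Int × Int) :
    List (Int × Int) × List (List Int) :=
  let t := slide board N M d (slideFuel N M) c
  if mget st.2 t.1 t.2 = -1 then
    (st.1 ++ [t], mset st.2 t.1 t.2 (mget st.2 c.1 c.2 + 1))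
  else st

-- `while q:` — fuel (N*M).toNat + 1 is exactly enough: every append marks a fresh cell
def aloop (board : List String) (N M : Int) (g : Int × Int) :
    Nat → List (Int × Int) → List (List Int) → Int
  | 0, _, _ => -1
  | _ + 1, [], _ => -1
  | fuel + 1, c :: q, v =>
      if c = g then mget v c.1 c.2
      else
        let st := dirs.foldl (aStep board N M c) (q, v)
        aloop board N M g fuel st.1 st.2

def solution (board : List String) : Int :=
  let N : Int := board.length
  let M : Int := ((board.headD "").toList).length
  let sg := scanRG board N M
  let s := sg.1.getD (0, 0)   -- Pre_ guarantees the scan found 'R' (Python: NameError otherwise)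
  let g := sg.2.getD (0, 0)
  let v0 : List (List Int) := List.replicate N.toNat (List.replicate M.toNat (-1))
  aloop board N M g ((N * M).toNat + 1) [s] (mset v0 s.1 s.2 0)

-- ===== PORT B =====

-- `grown.add((dx, dy))` for one direction of one cell of `reach`
def bAdd (board : List String) (N M : Int) (c : Int × Int)
    (S : PySem.Set (Int × Int)) (d : Int × Int) : PySem.Set (Int × Int) :=
  PySem.Set.add S (slide board N M d (slideFuel N M) c)

-- one round: `grown = set(reach); for (x,y) in reach: for d in …: grown.add(slide …)`
-- (the returned set and the final int do not depend on the iteration order over `reach`)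
def bExpand (board : List String) (N M : Int) (R : PySem.Set (Int × Int)) :
    PySem.Set (Int × Int) :=
  R.foldl (fun acc c => dirs.foldl (bAdd board N M c) acc) R

-- `while True:` — one fuel unit per round; each round either returns or grows the set by
-- at least one of the at most N*M cells, so (N*M).toNat + 1 rounds suffice under Pre_
def bloop (board : List String) (N M : Int) (g : Int × Int) :
    Nat → PySem.Set (Int × Int) → Int → Int
  | 0, _, _ => -1
  | fuel + 1, R, step =>
      if g ∈ R then step
      else
        let nr := bExpand board N M R
        if nr.length = R.length then -1
        else bloop board N M g fuel nr (step + 1)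

def solution_alt (board : List String) : Int :=
  let N : Int := board.length
  let M : Int := ((board.headD "").toList).length
  let sg := scanRG board N M
  let s := sg.1.getD (0, 0)
  let g := sg.2.getD (0, 0)
  bloop board N M g ((N * M).toNat + 1) (PySem.Set.ofList [s]) 0

-- ===== PRECONDITION & SPEC =====

-- the rectangle the scan loops read: the first M = len(board[0]) characters of every row
def scanArea (board : List String) : List Char :=
  (board.map (fun r => r.toList.take ((board.headD "").toList).length)).flatten

-- exactly the inputs where Python A returns normally: a nonempty board whose rows are all at
-- least as long as the first (shorter rows: IndexError) containing an 'R' and a 'G' in the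
-- scanned N×M rectangle (otherwise: NameError on `start`/`goal`).
def Pre_solution (board : List String) : Prop :=
  board ≠ [] ∧
  (∀ r ∈ board, ((board.headD "").toList).length ≤ r.toList.length) ∧
  'R' ∈ scanArea board ∧ 'G' ∈ scanArea board

instance (board : List String) : Decidable (Pre_solution board) := by
  unfold Pre_solution; infer_instance

def pvWitness_solution : List String := ["RG"]

def Spec_solution (board : List String) (out : Int) : Prop := out = solution_alt board
instance (board : List String) (out : Int) : Decidable (Spec_solution board out) := by unfold Spec_solution; infer_instance

-- ===== CLAIM (what is proved, stated in full; the proofs are below) =====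
def Claim_equal_solution : Prop := ∀ (board : List String), Dom_solution board → Pre_solution board → Spec_solution board (solution board)

-- ===== LEMMAS AND PROOFS =====

-- in-range cells of the N×M rectangle
def InR (N M : Int) (c : Int × Int) : Prop :=
  0 ≤ c.1 ∧ c.1 < N ∧ 0 ≤ c.2 ∧ c.2 < M

-- v is an N×M matrix
def Dims (N M : Int) (v : List (List Int)) : Prop :=
  v.length = N.toNat ∧ ∀ r ∈ v, r.length = M.toNat

-- number of unvisited (= -1) entries of v
def countNeg (v : List (List Int)) : Nat :=
  (v.map (fun r => r.count (-1))).sum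

-- A's matrix and B's reachable set mark the same in-range cells
def InvVis (N M : Int) (v : List (List Int)) (R : List (Int × Int)) : Prop :=
  ∀ c : Int × Int, InR N M c → (mget v c.1 c.2 ≠ -1 ↔ c ∈ R)

-- every slide out of every cell of P lands inside R (processed levels are closed)
def Closed (board : List String) (N M : Int) (P R : List (Int × Int)) : Prop :=
  ∀ c ∈ P, ∀ d ∈ dirs, slide board N M d (slideFuel N M) c ∈ R

-- getD/set facts for the guarded matrix accesses (thin combinations of library lemmas)
lemma getD_set_eq {A : Type} (l : List A) (n : Nat) (a d : A) (h : n < l.length) :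
    (l.set n a).getD n d = a := by
  simp [List.getD_eq_getElem?_getD, h]

lemma getD_set_ne {A : Type} (l : List A) (n m : Nat) (a d : A) (h : m ≠ n) :
    (l.set n a).getD m d = l.getD m d := by
  simp [List.getD_eq_getElem?_getD, Ne.symm h]

lemma getD_mem {A : Type} (l : List A) (n : Nat) (d : A) (h : n < l.length) :
    l.getD n d ∈ l := by
  rw [List.getD_eq_getElem?_getD, List.getElem?_eq_getElem h]
  exact List.getElem_mem h

lemma slide_InR (board : List String) (N M : Int) (d : Int × Int) :
    ∀ (fuel : Nat) (p : Int × Int), InR N M p →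
      InR N M (slide board N M d fuel p) := by
  intro fuel
  induction fuel with
  | zero => intro p hp; simpa [slide] using hp
  | succ n ih =>
      intro p hp
      rw [slide]
      split
      · next h => exact ih _ ⟨h.1, h.2.1, h.2.2.1, h.2.2.2.1⟩
      · exact hp

lemma mget_mset_self (N M : Int) (v : List (List Int)) (i j x : Int)
    (hd : Dims N M v) (h : InR N M (i, j)) :
    mget (mset v i j x) i j = x := by
  obtain ⟨h1, h2, h3, h4⟩ := h
  have hi : i.toNat < v.length := by rw [hd.1]; omega
  have hrow : (v.getD i.toNat []).length = M.toNat := hd.2 _ (getD_mem v i.toNat [] hi)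
  have hj : j.toNat < (v.getD i.toNat []).length := by omega
  unfold mget mset
  rw [getD_set_eq _ _ _ _ hi, getD_set_eq _ _ _ _ hj]

lemma mget_mset_ne (N M : Int) (v : List (List Int)) (i j x : Int)
    (u : Int × Int) (hd : Dims N M v) (h : InR N M (i, j)) (hu : InR N M u)
    (hne : u ≠ (i, j)) :
    mget (mset v i j x) u.1 u.2 = mget v u.1 u.2 := by
  obtain ⟨h1, h2, h3, h4⟩ := h
  obtain ⟨hu1, hu2, hu3, hu4⟩ := hu
  have hi : i.toNat < v.length := by rw [hd.1]; omega
  unfold mget mset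
  by_cases hrow : u.1.toNat = i.toNat
  · have hu1i : u.1 = i := by omega
    have hcol : u.2 ≠ j := by
      intro e; exact hne (Prod.ext hu1i e)
    have hcoln : u.2.toNat ≠ j.toNat := by omega
    rw [hrow, getD_set_eq _ _ _ _ hi, getD_set_ne _ _ _ _ _ hcoln]
  · rw [getD_set_ne _ _ _ _ _ hrow]

lemma dims_mset (N M : Int) (v : List (List Int)) (i j x : Int)
    (hd : Dims N M v) (h : InR N M (i, j)) :
    Dims N M (mset v i j x) := by
  obtain ⟨h1, h2, h3, h4⟩ := h
  have hi : i.toNat < v.length := by rw [hd.1]; omega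
  refine ⟨by simpa [mset] using hd.1, ?_⟩
  intro r hr
  rcases List.mem_or_eq_of_mem_set hr with hr | hr
  · exact hd.2 _ hr
  · subst hr
    simpa using hd.2 _ (getD_mem v i.toNat [] hi)

lemma count_set_succ (r : List Int) (m : Nat) (x : Int)
    (hm : m < r.length) (hr : r.getD m (-2) = -1) (hx : x ≠ -1) :
    (r.set m x).count (-1) + 1 = r.count (-1) := by
  induction r generalizing m with
  | nil => simp at hm
  | cons a r ih =>
      cases m with
      | zero =>
          simp only [List.getD_cons_zero] at hr
          subst hr
          simp [hx]
      | succ m =>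
          simp only [List.getD_cons_succ] at hr
          have := ih m (by simpa using hm) hr
          simp only [List.set_cons_succ, List.count_cons]
          omega

lemma countNeg_set (v : List (List Int)) (n : Nat) (r' : List Int)
    (hn : n < v.length) (h : r'.count (-1) + 1 = (v.getD n []).count (-1)) :
    countNeg (v.set n r') + 1 = countNeg v := by
  induction v generalizing n with
  | nil => simp at hn
  | cons a v ih =>
      cases n with
      | zero =>
          simp only [List.getD_cons_zero] at h
          simp [countNeg, List.set_cons_zero]
          omega
      | succ n =>
          simp only [List.getD_cons_succ] at h
          have := ih n (by simpa using hn) h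
          simp only [List.set_cons_succ]
          simp only [countNeg, List.map_cons, List.sum_cons] at this ⊢
          omega

lemma countNeg_mset (N M : Int) (v : List (List Int)) (i j x : Int)
    (hd : Dims N M v) (h : InR N M (i, j)) (hv : mget v i j = -1) (hx : x ≠ -1) :
    countNeg (mset v i j x) + 1 = countNeg v := by
  obtain ⟨h1, h2, h3, h4⟩ := h
  have hi : i.toNat < v.length := by rw [hd.1]; omega
  have hrow : (v.getD i.toNat []).length = M.toNat := hd.2 _ (getD_mem v i.toNat [] hi)
  have hj : j.toNat < (v.getD i.toNat []).length := by omega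
  unfold mset
  exact countNeg_set v i.toNat _ hi (count_set_succ _ _ _ hj hv hx)

lemma set_add_mem (S : PySem.Set (Int × Int)) (t : Int × Int) (h : t ∈ S) :
    PySem.Set.add S t = S := by
  simp [PySem.Set.add, PySem.Set.contains, h]

lemma set_add_not_mem (S : PySem.Set (Int × Int)) (t : Int × Int) (h : t ∉ S) :
    PySem.Set.add S t = S ++ [t] := by
  simp [PySem.Set.add, PySem.Set.contains, h]

-- joint step through the four directions of one cell: A's fold appends exactly the new
-- cells Δ to the queue, and B's fold adds exactly the same Δ to the grown set
lemma fold_joint (board : List String) (N M : Int) :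
    ∀ (ds : List (Int × Int)) (c : Int × Int) (v : List (List Int))
      (S : PySem.Set (Int × Int)) (qa : List (Int × Int)) (step : Int),
      Dims N M v → InvVis N M v S → InR N M c → 0 ≤ step →
      mget v c.1 c.2 = step →
      ∃ Δ v',
        ds.foldl (aStep board N M c) (qa, v) = (qa ++ Δ, v') ∧
        ds.foldl (bAdd board N M c) S = S ++ Δ ∧
        Dims N M v' ∧ InvVis N M v' (S ++ Δ) ∧
        (∀ t ∈ Δ, InR N M t ∧ mget v' t.1 t.2 = step + 1) ∧
        countNeg v' + Δ.length = countNeg v ∧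
        (∀ u : Int × Int, InR N M u → mget v u.1 u.2 ≠ -1 →
          mget v' u.1 u.2 = mget v u.1 u.2) ∧
        (∀ d ∈ ds, slide board N M d (slideFuel N M) c ∈ S ++ Δ) := by
  intro ds
  induction ds with
  | nil =>
      intro c v S qa step hd hiv hc hs hval
      exact ⟨[], v, by simp, by simp, hd, by simpa using hiv, by simp, by simp,
        fun u _ _ => rfl, by simp⟩
  | cons d ds ih =>
      intro c v S qa step hd hiv hc hs hval
      have htR : InR N M (slide board N M d (slideFuel N M) c) :=
        slide_InR board N M d (slideFuel N M) c hc
      set t := slide board N M d (slideFuel N M) c with ht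
      simp only [List.foldl_cons]
      by_cases hnew : mget v t.1 t.2 = -1
      · have hctne : c ≠ t := by
          intro e
          have h1 : mget v t.1 t.2 = step := by rw [← e]; exact hval
          omega
        have hnv : t ∉ S := fun hm => ((hiv t htR).mpr hm) hnew
        have hA1 : aStep board N M c (qa, v) d
            = (qa ++ [t], mset v t.1 t.2 (mget v c.1 c.2 + 1)) := by
          simp [aStep, ← ht, hnew]
        have hB1 : bAdd board N M c S d = S ++ [t] := by
          rw [bAdd, ← ht]; exact set_add_not_mem S t hnv
        have hd1 : Dims N M (mset v t.1 t.2 (mget v c.1 c.2 + 1)) :=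
          dims_mset N M v t.1 t.2 _ hd htR
        have hself : mget (mset v t.1 t.2 (mget v c.1 c.2 + 1)) t.1 t.2 = step + 1 := by
          rw [mget_mset_self N M v t.1 t.2 _ hd htR, hval]
        have hne' : ∀ u : Int × Int, InR N M u → u ≠ t →
            mget (mset v t.1 t.2 (mget v c.1 c.2 + 1)) u.1 u.2 = mget v u.1 u.2 := by
          intro u hu hune
          exact mget_mset_ne N M v t.1 t.2 _ u hd htR hu (by rw [Prod.mk.eta]; exact hune)
        have hiv1 : InvVis N M (mset v t.1 t.2 (mget v c.1 c.2 + 1)) (S ++ [t]) := by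
          intro u hu
          by_cases he : u = t
          · constructor
            · intro _; rw [he]; exact List.mem_append_right _ (List.mem_singleton_self t)
            · intro _; rw [he, hself]; omega
          · rw [hne' u hu he]
            constructor
            · intro hm; exact List.mem_append_left _ ((hiv u hu).mp hm)
            · intro hm
              rcases List.mem_append.mp hm with hm | hm
              · exact (hiv u hu).mpr hm
              · exact absurd (List.mem_singleton.mp hm) he
        have hval1 : mget (mset v t.1 t.2 (mget v c.1 c.2 + 1)) c.1 c.2 = step := by
          rw [hne' c hc hctne]; exact hval
        have hcnt1 : countNeg (mset v t.1 t.2 (mget v c.1 c.2 + 1)) + 1 = countNeg v :=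
          countNeg_mset N M v t.1 t.2 _ hd htR hnew (by omega)
        obtain ⟨D, v2, hA, hB, hd2, hiv2, hD, hcnt, hpres, hcl⟩ :=
          ih c (mset v t.1 t.2 (mget v c.1 c.2 + 1)) (S ++ [t]) (qa ++ [t]) step
            hd1 hiv1 hc hs hval1
        refine ⟨t :: D, v2, ?_, ?_, hd2, ?_, ?_, ?_, ?_, ?_⟩
        · rw [hA1, hA]; simp
        · rw [hB1, hB]; simp
        · simpa using hiv2
        · intro u hu
          rcases List.mem_cons.mp hu with he | hu
          · refine ⟨by rw [he]; exact htR, ?_⟩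
            rw [he, hpres t htR (by rw [hself]; omega)]
            exact hself
          · exact hD u hu
        · simp only [List.length_cons]; omega
        · intro u hu hmne
          have hut : u ≠ t := by intro e; rw [e, hnew] at hmne; exact hmne rfl
          rw [hpres u hu (by rw [hne' u hu hut]; exact hmne)]
          exact hne' u hu hut
        · intro d' hd'
          rcases List.mem_cons.mp hd' with he | hd'
          · subst he
            rw [← ht]
            exact List.mem_append_right _ List.mem_cons_self
          · have := hcl d' hd'
            simpa using this
      · have hmem : t ∈ S := (hiv t htR).mp hnew
        have hA1 : aStep board N M c (qa, v) d = (qa, v) := by simp [aStep, ← ht, hnew]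
        have hB1 : bAdd board N M c S d = S := by
          rw [bAdd, ← ht]; exact set_add_mem S t hmem
        rw [hA1, hB1]
        obtain ⟨D, v2, hA, hB, hd2, hiv2, hD, hcnt, hpres, hcl⟩ :=
          ih c v S qa step hd hiv hc hs hval
        refine ⟨D, v2, hA, hB, hd2, hiv2, hD, hcnt, hpres, ?_⟩
        intro d' hd'
        rcases List.mem_cons.mp hd' with he | hd'
        · subst he
          rw [← ht]
          rcases (List.mem_append.mp (List.mem_append_left D hmem)) with h | h
          · exact List.mem_append_left _ h
          · exact List.mem_append_right _ h
        · exact hcl d' hd'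

-- A-only version: the fold preserves dimensions and already-marked cells
lemma afold_pres (board : List String) (N M : Int) :
    ∀ (ds : List (Int × Int)) (c : Int × Int) (v : List (List Int))
      (qa : List (Int × Int)),
      Dims N M v → InR N M c →
      ∃ Δ v',
        ds.foldl (aStep board N M c) (qa, v) = (qa ++ Δ, v') ∧
        Dims N M v' ∧
        (∀ u : Int × Int, InR N M u → mget v u.1 u.2 ≠ -1 →
          mget v' u.1 u.2 = mget v u.1 u.2) := by
  intro ds
  induction ds with
  | nil =>
      intro c v qa hd hc
      exact ⟨[], v, by simp, hd, fun u _ _ => rfl⟩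
  | cons d ds ih =>
      intro c v qa hd hc
      have htR : InR N M (slide board N M d (slideFuel N M) c) :=
        slide_InR board N M d (slideFuel N M) c hc
      set t := slide board N M d (slideFuel N M) c with ht
      simp only [List.foldl_cons]
      by_cases hnew : mget v t.1 t.2 = -1
      · have hA1 : aStep board N M c (qa, v) d
            = (qa ++ [t], mset v t.1 t.2 (mget v c.1 c.2 + 1)) := by
          simp [aStep, ← ht, hnew]
        rw [hA1]
        obtain ⟨D, v2, hfold, hd2, hpres⟩ :=
          ih c (mset v t.1 t.2 (mget v c.1 c.2 + 1)) (qa ++ [t])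
            (dims_mset N M v t.1 t.2 _ hd htR) hc
        refine ⟨t :: D, v2, ?_, hd2, ?_⟩
        · rw [hfold]; simp
        · intro u hu hun
          have hut : u ≠ t := by intro e; rw [e, hnew] at hun; exact hun rfl
          have h1 : mget (mset v t.1 t.2 (mget v c.1 c.2 + 1)) u.1 u.2 = mget v u.1 u.2 :=
            mget_mset_ne N M v t.1 t.2 _ u hd htR hu (by rw [Prod.mk.eta]; exact hut)
          rw [hpres u hu (by rw [h1]; exact hun), h1]
      · have hA1 : aStep board N M c (qa, v) d = (qa, v) := by simp [aStep, ← ht, hnew]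
        rw [hA1]
        exact ih c v qa hd hc

-- if the goal is in the current level, A pops until it and returns the level index
lemma level_goal (board : List String) (N M : Int) (g : Int × Int) :
    ∀ (L acc : List (Int × Int)) (v : List (List Int)) (afuel : Nat) (step : Int),
      Dims N M v → (∀ c ∈ L, InR N M c ∧ mget v c.1 c.2 = step) →
      g ∈ L → 0 ≤ step → L.length ≤ afuel →
      aloop board N M g afuel (L ++ acc) v = step := by
  intro L
  induction L with
  | nil => intro acc v afuel step hd hL hg; simp at hg
  | cons c L ih =>
      intro acc v afuel step hd hL hg hs hfuel
      obtain ⟨hcR, hcv⟩ := hL c (List.mem_cons_self)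
      cases afuel with
      | zero => simp at hfuel
      | succ f =>
          rw [List.cons_append, aloop]
          by_cases hcg : c = g
          · rw [if_pos hcg]; exact hcv
          · rw [if_neg hcg]
            have hgL : g ∈ L := by
              rcases List.mem_cons.mp hg with h | h
              · exact absurd h.symm hcg
              · exact h
            obtain ⟨D, v2, hfold, hd2, hpres⟩ :=
              afold_pres board N M dirs c v (L ++ acc) hd hcR
            simp only [hfold, List.append_assoc]
            refine ih (acc ++ D) v2 f step hd2 ?_ hgL hs (by simp at hfuel; omega)
            intro x hx
            obtain ⟨hx1, hx2⟩ := hL x (List.mem_cons_of_mem _ hx)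
            exact ⟨hx1, by rw [hpres x hx1 (by rw [hx2]; omega)]; exact hx2⟩

-- cells all of whose slides are already in the accumulated set contribute nothing to it
lemma closed_cell_fold (board : List String) (N M : Int) (c : Int × Int) :
    ∀ (ds : List (Int × Int)) (acc : PySem.Set (Int × Int)),
      (∀ d ∈ ds, slide board N M d (slideFuel N M) c ∈ acc) →
      ds.foldl (bAdd board N M c) acc = acc := by
  intro ds
  induction ds with
  | nil => intro acc _; rfl
  | cons d ds ih =>
      intro acc h
      rw [List.foldl_cons, bAdd, set_add_mem acc _ (h d List.mem_cons_self)]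
      exact ih acc (fun d' hd' => h d' (List.mem_cons_of_mem _ hd'))

lemma closed_fold (board : List String) (N M : Int) :
    ∀ (P : List (Int × Int)) (acc : PySem.Set (Int × Int)),
      (∀ c ∈ P, ∀ d ∈ dirs, slide board N M d (slideFuel N M) c ∈ acc) →
      P.foldl (fun S c => dirs.foldl (bAdd board N M c) S) acc = acc := by
  intro P
  induction P with
  | nil => intro acc _; rfl
  | cons c P ih =>
      intro acc h
      rw [List.foldl_cons, closed_cell_fold board N M c dirs acc (h c List.mem_cons_self)]
      exact ih acc (fun c' hc' => h c' (List.mem_cons_of_mem _ hc'))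

-- if the goal is not in the current level, A runs through it and B's fold over the level
-- discovers exactly the same new cells Δ
lemma level_run (board : List String) (N M : Int) (g : Int × Int) :
    ∀ (L accA : List (Int × Int)) (v : List (List Int))
      (S : PySem.Set (Int × Int)) (afuel : Nat) (step : Int),
      Dims N M v → InvVis N M v S →
      (∀ c ∈ L, InR N M c ∧ mget v c.1 c.2 = step) →
      (∀ c ∈ accA, InR N M c ∧ mget v c.1 c.2 = step + 1) →
      g ∉ L → 0 ≤ step →
      L.length + accA.length + countNeg v + 1 ≤ afuel →
      ∃ Δ v',
        L.foldl (fun S c => dirs.foldl (bAdd board N M c) S) S = S ++ Δ ∧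
        aloop board N M g afuel (L ++ accA) v
          = aloop board N M g (afuel - L.length) (accA ++ Δ) v' ∧
        Dims N M v' ∧ InvVis N M v' (S ++ Δ) ∧
        (∀ c ∈ accA ++ Δ, InR N M c ∧ mget v' c.1 c.2 = step + 1) ∧
        (accA ++ Δ).length + countNeg v' = accA.length + countNeg v ∧
        (accA ++ Δ).length + countNeg v' + 1 ≤ afuel - L.length ∧
        Closed board N M L (S ++ Δ) := by
  intro L
  induction L with
  | nil =>
      intro accA v S afuel step hd hiv hL haccA hg hs hfuel
      refine ⟨[], v, by simp, by simp, hd, by simpa using hiv, by simpa using haccA,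
        by simp, by simpa using hfuel, ?_⟩
      intro c hc; simp at hc
  | cons c L ih =>
      intro accA v S afuel step hd hiv hL haccA hg hs hfuel
      obtain ⟨hcR, hcv⟩ := hL c (List.mem_cons_self)
      have hcg : c ≠ g := fun e => hg (e ▸ List.mem_cons_self)
      cases afuel with
      | zero => exfalso; simp at hfuel
      | succ f =>
          rw [List.cons_append, aloop, if_neg hcg]
          obtain ⟨D, v1, hA, hB, hd1, hiv1, hD, hcnt1, hpres, hcl⟩ :=
            fold_joint board N M dirs c v S (L ++ accA) step hd hiv hcR hs hcv
          simp only [hA, List.append_assoc]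
          obtain ⟨D2, v2, hBfold, hAres, hd2, hiv2, hacc2, hcnt2, hfuel2, hcl2⟩ :=
            ih (accA ++ D) v1 (S ++ D) f step hd1 hiv1
              (by
                intro x hx
                obtain ⟨hx1, hx2⟩ := hL x (List.mem_cons_of_mem _ hx)
                exact ⟨hx1, by rw [hpres x hx1 (by rw [hx2]; omega)]; exact hx2⟩)
              (by
                intro x hx
                rcases List.mem_append.mp hx with h | h
                · obtain ⟨h1, h2⟩ := haccA x h
                  exact ⟨h1, by rw [hpres x h1 (by rw [h2]; omega)]; exact h2⟩
                · exact hD x h)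
              (fun hgL => hg (List.mem_cons_of_mem _ hgL)) hs
              (by simp only [List.length_cons, List.length_append] at hfuel ⊢; omega)
          have he : f + 1 - (c :: L).length = f - L.length := by
            simp only [List.length_cons]; omega
          refine ⟨D ++ D2, v2, ?_, ?_, hd2, ?_, ?_, ?_, ?_, ?_⟩
          · rw [List.foldl_cons, hB, hBfold, List.append_assoc]
          · rw [hAres, he]
            simp only [List.append_assoc]
          · rw [← List.append_assoc]; exact hiv2
          · intro x hx
            apply hacc2
            simp only [List.mem_append] at hx ⊢
            tauto
          · simp only [List.length_append] at hcnt2 ⊢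
            omega
          · rw [he]
            simp only [List.length_append] at hfuel2 ⊢
            omega
          · intro x hx d' hd'
            rcases List.mem_cons.mp hx with hxc | hxL
            · subst hxc
              have h1 := hcl d' hd'
              rcases List.mem_append.mp h1 with h | h
              · exact List.mem_append_left _ h
              · exact List.mem_append_right _ (List.mem_append_left _ h)
            · rw [← List.append_assoc]
              exact hcl2 x hxL d' hd'

lemma aloop_nil (board : List String) (N M : Int) (g : Int × Int)
    (fuel : Nat) (v : List (List Int)) (h : 1 ≤ fuel) :
    aloop board N M g fuel [] v = -1 := by
  cases fuel with
  | zero => omega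
  | succ n => simp [aloop]

-- the main simulation: at each round boundary B's set is A's processed cells P followed by
-- A's queue L, and processed cells are closed so re-expanding them adds nothing
lemma sim (board : List String) (N M : Int) (g : Int × Int) :
    ∀ (bfuel afuel : Nat) (L P : List (Int × Int)) (v : List (List Int)) (step : Int),
      Dims N M v → InvVis N M v (P ++ L) →
      (∀ c ∈ L, InR N M c ∧ mget v c.1 c.2 = step) →
      Closed board N M P (P ++ L) → g ∉ P → 0 ≤ step →
      L.length + countNeg v + 1 ≤ afuel → countNeg v + 1 ≤ bfuel →
      aloop board N M g afuel L v = bloop board N M g bfuel (P ++ L) step := by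
  intro bfuel
  induction bfuel with
  | zero => intro afuel L P v step hd hiv hL hcl hgP hs ha hb; omega
  | succ bf ih =>
      intro afuel L P v step hd hiv hL hcl hgP hs ha hb
      rw [bloop]
      by_cases hgR : g ∈ P ++ L
      · have hgL : g ∈ L := by
          rcases List.mem_append.mp hgR with h | h
          · exact absurd h hgP
          · exact h
        rw [if_pos hgR]
        have h1 := level_goal board N M g L [] v afuel step hd hL hgL hs (by omega)
        simpa using h1
      · rw [if_neg hgR]
        have hgL : g ∉ L := fun h => hgR (List.mem_append_right _ h)
        obtain ⟨Δ, v', hBfold, hAres, hd', hiv', hΔ, hcnt, hfuel', hclL⟩ :=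
          level_run board N M g L [] v (P ++ L) afuel step hd hiv hL (by simp) hgL hs
            (by simpa using ha)
        have hexp : bExpand board N M (P ++ L) = (P ++ L) ++ Δ := by
          rw [bExpand, List.foldl_append]
          rw [closed_fold board N M P (P ++ L) (fun c hc => hcl c hc)]
          exact hBfold
        simp only [hexp, List.length_append]
        have hA0 : aloop board N M g afuel L v
            = aloop board N M g (afuel - L.length) Δ v' := by
          have h2 := hAres
          rw [List.append_nil] at h2
          simpa using h2
        rw [hA0]
        by_cases hnil : Δ = []
        · subst hnil
          rw [if_pos (by simp)]
          exact aloop_nil board N M g _ v' (by simp at hfuel'; omega)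
        · have hlen : 1 ≤ Δ.length := List.length_pos_of_ne_nil hnil
          rw [if_neg (by omega)]
          have hcl' : Closed board N M (P ++ L) ((P ++ L) ++ Δ) := by
            intro x hx d' hd'
            rcases List.mem_append.mp hx with h | h
            · exact List.mem_append_left _ (hcl x h d' hd')
            · exact hclL x h d' hd'
          have h3 := ih (afuel - L.length) Δ (P ++ L) v' (step + 1) hd'
            (by rw [List.append_assoc] at hiv' ⊢; simpa using hiv')
            (by simpa using hΔ) hcl' hgR (by omega)
            (by simpa using hfuel') (by simp at hcnt; omega)
          rw [h3, List.append_assoc]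

-- the scan result (defaulted to (0,0)) is always an in-range cell of a nonempty board
lemma scan_fst_InR (board : List String) (N M : Int) (hN : 1 ≤ N) (hM : 1 ≤ M) :
    InR N M ((scanRG board N M).1.getD (0, 0)) := by
  have key : ∀ c, (scanRG board N M).1 = some c → InR N M c := by
    rw [scanRG]
    refine List.foldlRecOn (motive := fun (st : Option (Int × Int) × Option (Int × Int)) => ∀ c, st.1 = some c → InR N M c) _ _ ?_ ?_
    · intro c hc; simp at hc
    · intro st hst i hi
      have hi' : 0 ≤ i ∧ i < N := (PySem.List.mem_pyRange_one).mp hi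
      refine List.foldlRecOn (motive := fun (st : Option (Int × Int) × Option (Int × Int)) => ∀ c, st.1 = some c → InR N M c) _ _ hst ?_
      intro st2 hst2 j hj
      have hj' : 0 ≤ j ∧ j < M := (PySem.List.mem_pyRange_one).mp hj
      intro c hc
      by_cases hG : bget board i j = 'G' <;> by_cases hR : bget board i j = 'R' <;>
        simp [hG, hR] at hc
      · exact hst2 c hc
      · exact hst2 c hc
      · rcases hc with rfl
        exact ⟨hi'.1, hi'.2, hj'.1, hj'.2⟩
      · exact hst2 c hc
  cases hsc : (scanRG board N M).1 with
  | none =>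
      refine ⟨?_, ?_, ?_, ?_⟩ <;> simp <;> omega
  | some c => simpa using key c hsc

-- a board whose scan rectangle contains a character has a nonempty first row
lemma M_pos (board : List String) (h : 'R' ∈ scanArea board) :
    1 ≤ ((((board.headD "").toList).length : Nat) : Int) := by
  by_contra hlt
  have h0 : ((board.headD "").toList).length = 0 := by omega
  obtain ⟨l, hl, hRl⟩ := List.mem_flatten.mp h
  obtain ⟨r, hr, rfl⟩ := List.mem_map.mp hl
  rw [h0] at hRl
  simp at hRl

-- ===== VERDICT (by name: the statement is the Claim_ definition above) =====
theorem solution_spec : Claim_equal_solution := by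
  intro board _ hpre
  obtain ⟨hne, hlen, hR, hG⟩ := hpre
  have hN : 1 ≤ ((board.length : Nat) : Int) := by
    have := List.length_pos_of_ne_nil hne
    omega
  have hM : 1 ≤ ((((board.headD "").toList).length : Nat) : Int) := M_pos board hR
  unfold Spec_solution solution solution_alt
  set Nv : Int := ((board.length : Nat) : Int) with hNv
  set Mv : Int := ((((board.headD "").toList).length : Nat) : Int) with hMv
  set s : Int × Int := (scanRG board Nv Mv).1.getD (0, 0) with hsv
  set g : Int × Int := (scanRG board Nv Mv).2.getD (0, 0) with hgv
  set v0 : List (List Int) := List.replicate Nv.toNat (List.replicate Mv.toNat (-1)) with hv0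
  set v1 : List (List Int) := mset v0 s.1 s.2 0 with hv1
  have hsR : InR Nv Mv s := scan_fst_InR board Nv Mv hN hM
  have hd0 : Dims Nv Mv v0 := by
    constructor
    · simp [hv0]
    · intro r hr
      rw [List.eq_of_mem_replicate hr]
      simp
  have hm0 : ∀ c : Int × Int, InR Nv Mv c → mget v0 c.1 c.2 = -1 := by
    intro c hc
    obtain ⟨h1, h2, h3, h4⟩ := hc
    have hrow : v0.getD c.1.toNat [] = List.replicate Mv.toNat (-1) := by
      rw [hv0, List.getD_eq_getElem?_getD, List.getElem?_replicate, if_pos (by omega)]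
      rfl
    unfold mget
    rw [hrow, List.getD_eq_getElem?_getD, List.getElem?_replicate, if_pos (by omega)]
    rfl
  have hd1 : Dims Nv Mv v1 := dims_mset Nv Mv v0 s.1 s.2 0 hd0 hsR
  have hms : mget v1 s.1 s.2 = 0 := mget_mset_self Nv Mv v0 s.1 s.2 0 hd0 hsR
  have hiv1 : InvVis Nv Mv v1 [s] := by
    intro c hc
    by_cases he : c = s
    · constructor
      · intro _; rw [he]; exact List.mem_singleton_self s
      · intro _; rw [he, hms]; omega
    · have hne' : mget v1 c.1 c.2 = mget v0 c.1 c.2 :=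
        mget_mset_ne Nv Mv v0 s.1 s.2 0 c hd0 hsR hc (by rw [Prod.mk.eta]; exact he)
      rw [hne', hm0 c hc]
      simp [he]
  have hL : ∀ c ∈ [s], InR Nv Mv c ∧ mget v1 c.1 c.2 = 0 := by
    intro c hc
    rw [List.mem_singleton.mp hc]
    exact ⟨hsR, hms⟩
  have hc0 : countNeg v0 = board.length * ((board.headD "").toList).length := by
    rw [hv0]
    simp [countNeg, List.map_replicate, List.count_replicate_self, List.sum_replicate,
      smul_eq_mul, hNv, hMv]
  have hc1 : countNeg v1 + 1 = countNeg v0 :=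
    countNeg_mset Nv Mv v0 s.1 s.2 0 hd0 hsR (hm0 s hsR) (by omega)
  have hNM : (Nv * Mv).toNat = board.length * ((board.headD "").toList).length := by
    rw [hNv, hMv, ← Nat.cast_mul, Int.toNat_natCast]
  have hprod : 1 ≤ board.length * ((board.headD "").toList).length :=
    Nat.mul_pos (by omega) (by omega)
  show aloop board Nv Mv g ((Nv * Mv).toNat + 1) [s] v1
      = bloop board Nv Mv g ((Nv * Mv).toNat + 1) (PySem.Set.ofList [s]) 0
  have hofs : PySem.Set.ofList [s] = [s] := rfl
  rw [hofs]
  have hsim := sim board Nv Mv g ((Nv * Mv).toNat + 1) ((Nv * Mv).toNat + 1) [s] [] v1 0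
    hd1 (by simpa using hiv1) hL
    (by intro c hc; simp at hc) (by simp) (le_refl 0)
    (by simp only [List.length_cons, List.length_nil]; omega)
    (by omega)
  simpa using hsim
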